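-- pv_equiv track=rewrite | github.com/phqlong/AI-Assignment1 | assignment 2/combine.py | cutthrough
-- ===== SOURCE A (Python) =====
-- def key(a):
--     return a[1]
--
-- def cutthrough(fworker, worker):
--     maxlist = []
--     maxval = max(fworker, key=key)[1]
--     maxlist = [i for i in fworker if i[1] == maxval]
--
--     minlist = []
--
--     if fworker:
--         minval = min(fworker, key=key)[1]
--         minlist = [i for i in fworker if i[1] == minval]
--
--     delta = maxlist[0][1] - minlist[0][1]
--     return delta, maxlist, minlist
-- ===== SOURCE B (Python) =====
-- def cutthrough(fworker, worker):
--     if not fworker: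
--         raise ValueError("cutthrough() arg is an empty sequence")
--     first = fworker[0]
--     maxval = first[1]
--     minval = first[1]
--     maxlist = [first]
--     minlist = [first]
--     for item in fworker[1:]:
--         v = item[1]
--         if v > maxval:
--             maxval = v
--             maxlist = [item]
--         elif v == maxval:
--             maxlist.append(item)
--         if v < minval:
--             minval = v
--             minlist = [item]
--         elif v == minval:
--             minlist.append(item)
--     return maxval - minval, maxlist, minlist
-- ===== Notes on version B (the rewrite author's own statement) =====
-- stated objective: alternative
-- what changed: Replaced a max() scan, a min() scan and two full filter comprehensions over fworker by one single accumulating pass that maintains the running max/min value together with the lists of elements attaining them.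
import Mathlib
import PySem

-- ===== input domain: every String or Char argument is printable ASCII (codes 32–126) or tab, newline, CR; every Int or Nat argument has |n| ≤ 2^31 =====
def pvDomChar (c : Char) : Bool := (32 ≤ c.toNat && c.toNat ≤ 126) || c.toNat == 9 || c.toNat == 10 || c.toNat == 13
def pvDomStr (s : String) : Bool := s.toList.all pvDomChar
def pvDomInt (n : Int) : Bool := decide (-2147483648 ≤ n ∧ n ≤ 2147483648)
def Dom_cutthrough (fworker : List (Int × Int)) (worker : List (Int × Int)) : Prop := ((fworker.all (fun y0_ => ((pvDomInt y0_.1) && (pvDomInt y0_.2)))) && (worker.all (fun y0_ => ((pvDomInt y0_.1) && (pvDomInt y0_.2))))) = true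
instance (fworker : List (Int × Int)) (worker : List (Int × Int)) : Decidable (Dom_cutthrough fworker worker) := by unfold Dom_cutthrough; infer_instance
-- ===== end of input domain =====

-- B replaces A's four scans (max, min, two filter comprehensions) by one accumulating pass; equivalence proved on nonempty fworker (on [] both raise ValueError).

-- ===== PORT A =====
-- Literal transliteration of A: max()/min() via PySem.List.max?/min?, the two list
-- comprehensions as filters, delta read off maxlist[0][1] / minlist[0][1] via pyGet?.
def cutthrough (fworker : List (Int × Int)) (worker : List (Int × Int)) : Int × (List (Int × Int)) × (List (Int × Int)) :=
  match PySem.List.max? fworker (fun a => a.2) with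
  | none => (0, [], [])  -- Python: max() raises ValueError here; excluded by Pre_
  | some mx =>
    let maxval := mx.2
    let maxlist := fworker.filter (fun i => i.2 == maxval)
    let minlist : List (Int × Int) :=
      if fworker.isEmpty then []
      else
        match PySem.List.min? fworker (fun a => a.2) with
        | none => []
        | some mn => fworker.filter (fun i => i.2 == mn.2)
    match PySem.List.pyGet? maxlist 0, PySem.List.pyGet? minlist 0 with
    | some ma, some mi => (ma.2 - mi.2, maxlist, minlist)
    | _, _ => (0, maxlist, minlist)  -- unreachable under Pre_ (IndexError)

-- ===== PORT B =====
-- one step of B's single loop: update (maxval, maxlist, minval, minlist) with one item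
def cutStep (st : Int × List (Int × Int) × Int × List (Int × Int)) (item : Int × Int) :
    Int × List (Int × Int) × Int × List (Int × Int) :=
  let mx := if st.1 < item.2 then (item.2, [item])
            else if item.2 = st.1 then (st.1, st.2.1 ++ [item])
            else (st.1, st.2.1)
  let mn := if item.2 < st.2.2.1 then (item.2, [item])
            else if item.2 = st.2.2.1 then (st.2.2.1, st.2.2.2 ++ [item])
            else (st.2.2.1, st.2.2.2)
  (mx.1, mx.2, mn.1, mn.2)

def cutthrough_alt (fworker : List (Int × Int)) (worker : List (Int × Int)) : Int × (List (Int × Int)) × (List (Int × Int)) :=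
  match fworker with
  | [] => (0, [], [])  -- Source B raises ValueError here; excluded by Pre_
  | first :: rest =>
    let s := rest.foldl cutStep (first.2, [first], first.2, [first])
    (s.1 - s.2.2.1, s.2.1, s.2.2.2)

-- ===== PRECONDITION & SPEC =====
-- Pre_ excludes exactly the empty fworker, on which A's max() (and B's explicit guard) raises ValueError.
def Pre_cutthrough (fworker : List (Int × Int)) (worker : List (Int × Int)) : Prop := fworker ≠ []
instance (fworker : List (Int × Int)) (worker : List (Int × Int)) : Decidable (Pre_cutthrough fworker worker) := by unfold Pre_cutthrough; infer_instance
def pvWitness_cutthrough : (List (Int × Int)) × (List (Int × Int)) := ([(1, 2), (3, 2), (0, 5)], [])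

def Spec_cutthrough (fworker : List (Int × Int)) (worker : List (Int × Int)) (out : Int × (List (Int × Int)) × (List (Int × Int))) : Prop := out = cutthrough_alt fworker worker
instance (fworker : List (Int × Int)) (worker : List (Int × Int)) (out : Int × (List (Int × Int)) × (List (Int × Int))) : Decidable (Spec_cutthrough fworker worker out) := by unfold Spec_cutthrough; infer_instance

-- ===== CLAIM (what is proved, stated in full; the proofs are below) =====
def Claim_equal_cutthrough : Prop := ∀ (fworker : List (Int × Int)) (worker : List (Int × Int)), Dom_cutthrough fworker worker → Pre_cutthrough fworker worker → Spec_cutthrough fworker worker (cutthrough fworker worker)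

-- ===== LEMMAS AND PROOFS =====
-- running max / min of the second components, seeded with v
def rmax (v : Int) (l : List (Int × Int)) : Int := l.foldl (fun acc x => max acc x.2) v
def rmin (v : Int) (l : List (Int × Int)) : Int := l.foldl (fun acc x => min acc x.2) v

theorem rmax_cons (v : Int) (x : Int × Int) (l : List (Int × Int)) : rmax v (x :: l) = rmax (max v x.2) l := rfl
theorem rmin_cons (v : Int) (x : Int × Int) (l : List (Int × Int)) : rmin v (x :: l) = rmin (min v x.2) l := rfl

theorem le_rmax (v : Int) (l : List (Int × Int)) : v ≤ rmax v l := by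
  induction l generalizing v with
  | nil => simp [rmax]
  | cons x t ih => exact le_trans (le_max_left v x.2) (ih (max v x.2))

theorem rmin_le (v : Int) (l : List (Int × Int)) : rmin v l ≤ v := by
  induction l generalizing v with
  | nil => simp [rmin]
  | cons x t ih => exact le_trans (ih (min v x.2)) (min_le_left v x.2)

theorem mem_le_rmax (v : Int) (l : List (Int × Int)) : ∀ x ∈ l, x.2 ≤ rmax v l := by
  induction l generalizing v with
  | nil => simp
  | cons y t ih =>
    intro x hx
    rcases List.mem_cons.mp hx with h | h
    · subst h; exact le_trans (le_max_right v x.2) (le_rmax _ t)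
    · exact ih (max v y.2) x h

theorem rmin_le_mem (v : Int) (l : List (Int × Int)) : ∀ x ∈ l, rmin v l ≤ x.2 := by
  induction l generalizing v with
  | nil => simp
  | cons y t ih =>
    intro x hx
    rcases List.mem_cons.mp hx with h | h
    · subst h; exact le_trans (rmin_le _ t) (min_le_right v x.2)
    · exact ih (min v y.2) x h

theorem rmax_append (v : Int) (p q : List (Int × Int)) : rmax v (p ++ q) = rmax (rmax v p) q := by
  simp [rmax, List.foldl_append]

theorem rmin_append (v : Int) (p q : List (Int × Int)) : rmin v (p ++ q) = rmin (rmin v p) q := by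
  simp [rmin, List.foldl_append]

-- B's loop invariant: from the extremum/filter state of a::p, processing rest yields that of a::(p++rest)
theorem loop_spec (rest : List (Int × Int)) (a : Int × Int) (p : List (Int × Int)) :
    List.foldl cutStep
      (rmax a.2 p, (a :: p).filter (fun i => i.2 == rmax a.2 p),
       rmin a.2 p, (a :: p).filter (fun i => i.2 == rmin a.2 p)) rest
    = (rmax a.2 (p ++ rest), (a :: (p ++ rest)).filter (fun i => i.2 == rmax a.2 (p ++ rest)),
       rmin a.2 (p ++ rest), (a :: (p ++ rest)).filter (fun i => i.2 == rmin a.2 (p ++ rest))) := by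
  induction rest generalizing p with
  | nil => simp
  | cons x t ih =>
    have hMapp : rmax a.2 (p ++ [x]) = max (rmax a.2 p) x.2 := by
      rw [rmax_append]; simp [rmax]
    have hmapp : rmin a.2 (p ++ [x]) = min (rmin a.2 p) x.2 := by
      rw [rmin_append]; simp [rmin]
    have hfilter : ∀ v : Int, (a :: (p ++ [x])).filter (fun i => i.2 == v)
        = (a :: p).filter (fun i => i.2 == v) ++ (if x.2 = v then [x] else []) := by
      intro v
      rw [show a :: (p ++ [x]) = (a :: p) ++ [x] from rfl, List.filter_append]
      congr 1
      by_cases h : x.2 = v <;> simp [h]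
    have hle : rmin a.2 p ≤ rmax a.2 p := le_trans (rmin_le a.2 p) (le_rmax a.2 p)
    have hstep : cutStep
        (rmax a.2 p, (a :: p).filter (fun i => i.2 == rmax a.2 p),
         rmin a.2 p, (a :: p).filter (fun i => i.2 == rmin a.2 p)) x
      = (rmax a.2 (p ++ [x]), (a :: (p ++ [x])).filter (fun i => i.2 == rmax a.2 (p ++ [x])),
         rmin a.2 (p ++ [x]), (a :: (p ++ [x])).filter (fun i => i.2 == rmin a.2 (p ++ [x]))) := by
      simp only [cutStep]
      by_cases h1 : rmax a.2 p < x.2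
      · -- strict new max; x cannot be ≤ the old min
        have hnoneMax : (a :: p).filter (fun i => i.2 == x.2) = [] := by
          rw [List.filter_eq_nil_iff]
          intro b hb
          have : b.2 ≤ rmax a.2 p := by
            rcases List.mem_cons.mp hb with h | h
            · rw [h]; exact le_rmax a.2 p
            · exact mem_le_rmax a.2 p b h
          simp only [beq_iff_eq]; omega
        rw [if_pos h1, if_neg (by omega : ¬ x.2 < rmin a.2 p), if_neg (by omega : ¬ x.2 = rmin a.2 p)]
        simp only [Prod.mk.injEq]
        refine ⟨by omega, ?_, by omega, ?_⟩
        · rw [hMapp, show max (rmax a.2 p) x.2 = x.2 by omega, hfilter, hnoneMax, if_pos rfl]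
          simp
        · rw [hmapp, show min (rmin a.2 p) x.2 = rmin a.2 p by omega, hfilter,
              if_neg (by omega : ¬ x.2 = rmin a.2 p)]
          simp
      · by_cases h2 : x.2 = rmax a.2 p
        · -- ties the max
          rw [if_neg h1, if_pos h2]
          by_cases h3 : x.2 < rmin a.2 p
          · omega
          · rw [if_neg h3]
            by_cases h4 : x.2 = rmin a.2 p
            · rw [if_pos h4]
              simp only [Prod.mk.injEq]
              refine ⟨by omega, ?_, by omega, ?_⟩
              · rw [hMapp, show max (rmax a.2 p) x.2 = rmax a.2 p by omega, hfilter, if_pos h2]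
              · rw [hmapp, show min (rmin a.2 p) x.2 = rmin a.2 p by omega, hfilter, if_pos h4]
            · rw [if_neg h4]
              simp only [Prod.mk.injEq]
              refine ⟨by omega, ?_, by omega, ?_⟩
              · rw [hMapp, show max (rmax a.2 p) x.2 = rmax a.2 p by omega, hfilter, if_pos h2]
              · rw [hmapp, show min (rmin a.2 p) x.2 = rmin a.2 p by omega, hfilter, if_neg h4]
                simp
        · -- strictly below the max
          rw [if_neg h1, if_neg h2]
          by_cases h3 : x.2 < rmin a.2 p
          · -- strict new min
            have hnoneMin : (a :: p).filter (fun i => i.2 == x.2) = [] := by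
              rw [List.filter_eq_nil_iff]
              intro b hb
              have : rmin a.2 p ≤ b.2 := by
                rcases List.mem_cons.mp hb with h | h
                · rw [h]; exact rmin_le a.2 p
                · exact rmin_le_mem a.2 p b h
              simp only [beq_iff_eq]; omega
            rw [if_pos h3]
            simp only [Prod.mk.injEq]
            refine ⟨by omega, ?_, by omega, ?_⟩
            · rw [hMapp, show max (rmax a.2 p) x.2 = rmax a.2 p by omega, hfilter, if_neg h2]
              simp
            · rw [hmapp, show min (rmin a.2 p) x.2 = x.2 by omega, hfilter, hnoneMin, if_pos rfl]
              simp
          · rw [if_neg h3]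
            by_cases h4 : x.2 = rmin a.2 p
            · rw [if_pos h4]
              simp only [Prod.mk.injEq]
              refine ⟨by omega, ?_, by omega, ?_⟩
              · rw [hMapp, show max (rmax a.2 p) x.2 = rmax a.2 p by omega, hfilter, if_neg h2]
                simp
              · rw [hmapp, show min (rmin a.2 p) x.2 = rmin a.2 p by omega, hfilter, if_pos h4]
            · rw [if_neg h4]
              simp only [Prod.mk.injEq]
              refine ⟨by omega, ?_, by omega, ?_⟩
              · rw [hMapp, show max (rmax a.2 p) x.2 = rmax a.2 p by omega, hfilter, if_neg h2]
                simp
              · rw [hmapp, show min (rmin a.2 p) x.2 = rmin a.2 p by omega, hfilter, if_neg h4]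
                simp
    calc List.foldl cutStep _ (x :: t)
        = List.foldl cutStep (cutStep _ x) t := rfl
      _ = _ := by
          rw [hstep, ih (p ++ [x])]
          simp [List.append_assoc]

-- the extremum value is attained by some element of a :: l
theorem rmax_attained : ∀ (l : List (Int × Int)) (a : Int × Int), ∃ x ∈ a :: l, x.2 = rmax a.2 l := by
  intro l
  induction l with
  | nil => intro a; exact ⟨a, by simp, rfl⟩
  | cons y t ih =>
    intro a
    rw [rmax_cons]
    by_cases h : y.2 ≤ a.2
    · obtain ⟨x, hx, hk⟩ := ih a
      refine ⟨x, ?_, by rw [show max a.2 y.2 = a.2 by omega]; exact hk⟩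
      rcases List.mem_cons.mp hx with h' | h' <;> simp [h']
    · obtain ⟨x, hx, hk⟩ := ih y
      refine ⟨x, ?_, by rw [show max a.2 y.2 = y.2 by omega]; exact hk⟩
      rcases List.mem_cons.mp hx with h' | h' <;> simp [h']

theorem rmin_attained : ∀ (l : List (Int × Int)) (a : Int × Int), ∃ x ∈ a :: l, x.2 = rmin a.2 l := by
  intro l
  induction l with
  | nil => intro a; exact ⟨a, by simp, rfl⟩
  | cons y t ih =>
    intro a
    rw [rmin_cons]
    by_cases h : a.2 ≤ y.2
    · obtain ⟨x, hx, hk⟩ := ih a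
      refine ⟨x, ?_, by rw [show min a.2 y.2 = a.2 by omega]; exact hk⟩
      rcases List.mem_cons.mp hx with h' | h' <;> simp [h']
    · obtain ⟨x, hx, hk⟩ := ih y
      refine ⟨x, ?_, by rw [show min a.2 y.2 = y.2 by omega]; exact hk⟩
      rcases List.mem_cons.mp hx with h' | h' <;> simp [h']

-- a nonempty filter starts with an element satisfying the predicate
theorem filter_head (l : List (Int × Int)) (v : Int) (x : Int × Int) (hx : x ∈ l) (hv : x.2 = v) :
    ∃ b t, l.filter (fun i => i.2 == v) = b :: t ∧ b.2 = v := by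
  have hne : l.filter (fun i => i.2 == v) ≠ [] := by
    intro h
    have := List.filter_eq_nil_iff.mp h x hx
    simp [hv] at this
  obtain ⟨b, t, hbt⟩ := List.exists_cons_of_ne_nil hne
  refine ⟨b, t, hbt, ?_⟩
  have hb : b ∈ l.filter (fun i => i.2 == v) := by rw [hbt]; simp
  have := List.of_mem_filter hb
  simpa using this

-- ===== VERDICT (by name: the statement is the Claim_ definition above) =====
theorem cutthrough_spec : Claim_equal_cutthrough := by
  intro fworker worker _ hpre
  unfold Spec_cutthrough
  match fworker with
  | [] => exact absurd rfl hpre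
  | a :: rest =>
    have hmaxne : PySem.List.max? (a :: rest) (fun y => y.2) ≠ none :=
      fun h => (List.cons_ne_nil a rest) ((PySem.List.max?_eq_none_iff _ _).mp h)
    have hminne : PySem.List.min? (a :: rest) (fun y => y.2) ≠ none :=
      fun h => (List.cons_ne_nil a rest) ((PySem.List.min?_eq_none_iff _ _).mp h)
    obtain ⟨rM, hmaxq⟩ := Option.ne_none_iff_exists'.mp hmaxne
    obtain ⟨rm, hminq⟩ := Option.ne_none_iff_exists'.mp hminne
    obtain ⟨xM, hxM, hvM⟩ := rmax_attained rest a
    obtain ⟨xm, hxm, hvm⟩ := rmin_attained rest a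
    have hkM : rM.2 = rmax a.2 rest := by
      refine le_antisymm ?_ ?_
      · have hmem := PySem.List.max?_mem hmaxq
        rcases List.mem_cons.mp hmem with h | h
        · rw [h]; exact le_rmax a.2 rest
        · exact mem_le_rmax a.2 rest rM h
      · have := PySem.List.max?_isMax hmaxq xM hxM
        omega
    have hkm : rm.2 = rmin a.2 rest := by
      refine le_antisymm ?_ ?_
      · have := PySem.List.min?_isMin hminq xm hxm
        omega
      · have hmem := PySem.List.min?_mem hminq
        rcases List.mem_cons.mp hmem with h | h
        · rw [h]; exact rmin_le a.2 rest
        · exact rmin_le_mem a.2 rest rm h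
    obtain ⟨bM, tM, hM, hbM⟩ := filter_head (a :: rest) (rmax a.2 rest) xM hxM hvM
    obtain ⟨bm, tm, hm, hbm⟩ := filter_head (a :: rest) (rmin a.2 rest) xm hxm hvm
    have hB : cutthrough_alt (a :: rest) worker
        = (rmax a.2 rest - rmin a.2 rest,
           (a :: rest).filter (fun i => i.2 == rmax a.2 rest),
           (a :: rest).filter (fun i => i.2 == rmin a.2 rest)) := by
      simp only [cutthrough_alt]
      rw [show (a.2, [a], a.2, [a])
            = (rmax a.2 ([] : List (Int × Int)),
               (a :: ([] : List (Int × Int))).filter (fun i => i.2 == rmax a.2 []),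
               rmin a.2 ([] : List (Int × Int)),
               (a :: ([] : List (Int × Int))).filter (fun i => i.2 == rmin a.2 [])) by
            simp [rmax, rmin]]
      rw [loop_spec rest a []]
      simp
    rw [hB]
    simp only [cutthrough, hmaxq, hminq, hkM, hkm, List.isEmpty_cons, Bool.false_eq_true,
      if_false]
    rw [hM, hm, PySem.List.pyGet?_zero_cons, PySem.List.pyGet?_zero_cons]
    simp only [hbM, hbm]
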